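-- pv_equiv track=rewrite | github.com/marketstateai/marketstate_cloned | data/dags/dbt/marketstate/data_model/generate_erd_html.py | layout_tables
-- ===== SOURCE A (Python) =====
-- from typing import Dict, List, Tuple
--
-- def layout_tables(tables: List[str]) -> Dict[str, Tuple[int, int]]:
--     # simple layout: two columns flowing down
--     x_left, x_right = 80, 520
--     y = 120
--     positions = {}
--     for i, t in enumerate(tables):
--         x = x_left if i % 2 == 0 else x_right
--         positions[t] = (x, y if i % 2 == 0 else y + 20)
--         if i % 2 == 1:
--             y += 220
--     return positions
-- ===== SOURCE B (Python) =====
-- def layout_tables(tables):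
--     # row-wise: each loop iteration lays out one whole two-column row
--     # (two tables at a time), collecting (name, (x, y)) pairs, then dict() assembles them.
--     pairs = []
--     y = 120
--     i = 0
--     n = len(tables)
--     while i < n:
--         pairs.append((tables[i], (80, y)))
--         if i + 1 < n:
--             pairs.append((tables[i + 1], (520, y + 20)))
--         i += 2
--         y += 220
--     return dict(pairs)
-- ===== Notes on version B (the rewrite author's own statement) =====
-- stated objective: alternative
-- what changed: Replaced A's per-element enumerate loop with parity tests and a conditionally-incremented y accumulator by a row-wise loop that consumes two tables per iteration (one two-column row, y advancing 220 per row), collecting a pair list that dict() assembles; B has no enumerate index and no parity check.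
import Mathlib
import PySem

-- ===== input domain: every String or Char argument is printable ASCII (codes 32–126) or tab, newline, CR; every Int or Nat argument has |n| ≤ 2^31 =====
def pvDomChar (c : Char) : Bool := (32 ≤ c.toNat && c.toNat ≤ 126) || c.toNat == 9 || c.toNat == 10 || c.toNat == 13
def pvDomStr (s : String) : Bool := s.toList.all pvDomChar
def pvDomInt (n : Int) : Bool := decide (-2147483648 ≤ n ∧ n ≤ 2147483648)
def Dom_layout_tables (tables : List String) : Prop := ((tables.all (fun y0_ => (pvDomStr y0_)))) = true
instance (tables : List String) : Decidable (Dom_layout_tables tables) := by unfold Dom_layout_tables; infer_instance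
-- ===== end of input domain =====

-- B builds the layout row-wise by recursion (two tables per call), assembling the dict from the pair list; same return value as A.

-- ===== PORT A =====
-- loop body of A: state is (y, positions)
def layoutStepA (st : Int × PySem.Dict String (Int × Int)) (it : Int × String) :
    Int × PySem.Dict String (Int × Int) :=
  let y := st.1
  let x : Int := if PySem.Int.mod it.1 2 = 0 then 80 else 520
  let positions := st.2.insert it.2 (x, if PySem.Int.mod it.1 2 = 0 then y else y + 20)
  (if PySem.Int.mod it.1 2 = 1 then y + 220 else y, positions)

def layout_tables (tables : List String) : List (String × Int × Int) :=
  (((PySem.List.enumerate tables).foldl layoutStepA (120, PySem.Dict.empty)).2).items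

-- ===== PORT B =====
-- B's while loop: one two-column row per iteration, consuming two tables; state (i, y, pairs)
def layoutLoopB (tables : List String) (i : Nat) (y : Int)
    (pairs : List (String × (Int × Int))) : List (String × (Int × Int)) :=
  if h : i < tables.length then
    let pairs := pairs ++ [(tables[i], (80, y))]        -- tables[i] in range by the loop guard
    let pairs := if h2 : i + 1 < tables.length then
        pairs ++ [(tables[i + 1], (520, y + 20))] else pairs
    layoutLoopB tables (i + 2) (y + 220) pairs
  else pairs
termination_by tables.length - i

-- dict(pairs): fold insert over the pair list
def layout_tables_alt (tables : List String) : List (String × Int × Int) :=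
  ((layoutLoopB tables 0 120 []).foldl (fun d kv => d.insert kv.1 kv.2) PySem.Dict.empty).items

-- ===== PRECONDITION & SPEC =====
def Spec_layout_tables (tables : List String) (out : List (String × Int × Int)) : Prop := out = layout_tables_alt tables
instance (tables : List String) (out : List (String × Int × Int)) : Decidable (Spec_layout_tables tables out) := by unfold Spec_layout_tables; infer_instance

-- ===== CLAIM (what is proved, stated in full; the proofs are below) =====
def Claim_equal_layout_tables : Prop := ∀ (tables : List String), Dom_layout_tables tables → Spec_layout_tables tables (layout_tables tables)

-- ===== LEMMAS AND PROOFS =====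

-- proof-only helper: the row list B's loop produces, written as structural recursion
def layoutRows : List String → Int → List (String × (Int × Int))
  | [], _ => []
  | [t], y => [(t, (80, y))]
  | t :: u :: ts, y => (t, (80, y)) :: (u, (520, y + 20)) :: layoutRows ts (y + 220)

-- B's loop from position i appends the row list of the remaining tables
theorem layoutLoopB_eq (tables : List String) (i : Nat) (y : Int)
    (pairs : List (String × (Int × Int))) :
    layoutLoopB tables i y pairs = pairs ++ layoutRows (tables.drop i) y := by
  rw [layoutLoopB]
  by_cases h : i < tables.length
  · by_cases h2 : i + 1 < tables.length
    · simp only [dif_pos h, dif_pos h2]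
      rw [layoutLoopB_eq tables (i + 2) (y + 220) _]
      rw [List.drop_eq_getElem_cons h, List.drop_eq_getElem_cons h2]
      simp [layoutRows]
    · simp only [dif_pos h, dif_neg h2]
      rw [layoutLoopB_eq tables (i + 2) (y + 220) _]
      rw [List.drop_eq_getElem_cons h]
      simp [List.drop_eq_nil_of_le (show tables.length ≤ i + 1 by omega),
            List.drop_eq_nil_of_le (show tables.length ≤ i + 2 by omega), layoutRows]
  · simp [dif_neg h, List.drop_eq_nil_of_le (show tables.length ≤ i by omega), layoutRows]
termination_by tables.length - i

-- invariant: A's fold over the enumeration from an even index 2*n with running y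
-- equals inserting the row list for the remaining tables starting at that y
theorem layout_aux (ts : List String) (y : Int) (n : Nat) (d : PySem.Dict String (Int × Int)) :
    ((PySem.List.enumerate ts ((2 * n : Nat) : Int)).foldl layoutStepA (y, d)).2 =
    (layoutRows ts y).foldl (fun d kv => d.insert kv.1 kv.2) d := by
  induction ts, y using layoutRows.induct generalizing n d with
  | case1 y => simp [PySem.List.enumerate_nil, layoutRows]
  | case2 t y =>
    simp [PySem.List.enumerate_cons, PySem.List.enumerate_nil, layoutRows, layoutStepA]
  | case3 t u ts y ih =>
    have hmod : PySem.Int.mod ((2 * n : Nat) : Int) 2 = 0 := by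
      rw [PySem.Int.mod_eq_emod_of_pos (by norm_num : (0:Int) < 2)]; omega
    have hmod1 : PySem.Int.mod (((2 * n : Nat) : Int) + 1) 2 = 1 := by
      rw [PySem.Int.mod_eq_emod_of_pos (by norm_num : (0:Int) < 2)]; omega
    simp only [PySem.List.enumerate_cons, List.foldl_cons]
    simp only [layoutStepA, hmod, hmod1]
    norm_num
    rw [show (2 * (n : Int) + 1 + 1) = ((2 * (n + 1) : Nat) : Int) from by push_cast; ring]
    simpa [layoutRows] using ih (n + 1) (d.insert t (80, y) |>.insert u (520, y + 20))

-- ===== VERDICT (by name: the statement is the Claim_ definition above) =====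
theorem layout_tables_spec : Claim_equal_layout_tables := by
  intro tables _
  unfold Spec_layout_tables layout_tables layout_tables_alt
  have h := layout_aux tables 120 0 PySem.Dict.empty
  norm_num at h
  rw [h, layoutLoopB_eq]
  simp
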